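-- pv_equiv track=rewrite | github.com/CBreazy/arc-agent-proj | arc_agent/engine.py | infer_horizontal_repeat
-- ===== SOURCE A (Python) =====
-- def extract_nonzero_positions(grid):
--     """Extract all non-zero positions"""
--     positions = []
--     for y, row in enumerate(grid):
--         for x, val in enumerate(row):
--             if val != 0:
--                 positions.append((x, y, val))
--     return positions
--
-- def infer_horizontal_repeat(grid):
--     """
--     If two non-zero values exist on the same row with consistent spacing, return the delta.
--     """
--     symbols = extract_nonzero_positions(grid)
--     horizontal_deltas = []
--
--     for i in range(len(symbols)):
--         for j in range(i + 1, len(symbols)):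
--             x1, y1, val1 = symbols[i]
--             x2, y2, val2 = symbols[j]
--
--             # Only compare same-row elements with different values
--             if y1 == y2 and val1 != val2:
--                 dx = abs(x2 - x1)
--                 if dx > 0:
--                     horizontal_deltas.append(dx)
--
--     # Return most common delta if any were found
--     if horizontal_deltas:
--         from collections import Counter
--         most_common = Counter(horizontal_deltas).most_common(1)[0][0]
--         return most_common
--
--     return None
-- ===== SOURCE B (Python) =====
-- def infer_horizontal_repeat(grid):
--     """
--     If two non-zero values exist on the same row with consistent spacing, return the delta.
--     Counting version: group the non-zero cells per row and tally each within-row spacing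
--     directly into an ordered count dict; the answer is the first-inserted key with the
--     maximal count (same tie-break as Counter.most_common). No global all-pairs scan,
--     no intermediate delta list.
--     """
--     counts = {}
--     for row in grid:
--         cells = [(x, v) for x, v in enumerate(row) if v != 0]
--         n = len(cells)
--         for i in range(n):
--             x1, v1 = cells[i]
--             for j in range(i + 1, n):
--                 x2, v2 = cells[j]
--                 if v1 != v2:
--                     d = x2 - x1
--                     counts[d] = counts.get(d, 0) + 1
--     if counts:
--         return max(counts, key=counts.get)
--     return None
-- ===== Notes on version B (the rewrite author's own statement) =====
-- stated objective: faster
-- what changed: B groups nonzero cells per row (so only within-row pairs are compared, x-ascending so no abs/positivity tests) and tallies each spacing straight into an insertion-ordered count dict, returning the first-inserted key of maximal count, instead of A's global all-pairs scan that builds a delta list and calls Counter.most_common at the end.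
import Mathlib
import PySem

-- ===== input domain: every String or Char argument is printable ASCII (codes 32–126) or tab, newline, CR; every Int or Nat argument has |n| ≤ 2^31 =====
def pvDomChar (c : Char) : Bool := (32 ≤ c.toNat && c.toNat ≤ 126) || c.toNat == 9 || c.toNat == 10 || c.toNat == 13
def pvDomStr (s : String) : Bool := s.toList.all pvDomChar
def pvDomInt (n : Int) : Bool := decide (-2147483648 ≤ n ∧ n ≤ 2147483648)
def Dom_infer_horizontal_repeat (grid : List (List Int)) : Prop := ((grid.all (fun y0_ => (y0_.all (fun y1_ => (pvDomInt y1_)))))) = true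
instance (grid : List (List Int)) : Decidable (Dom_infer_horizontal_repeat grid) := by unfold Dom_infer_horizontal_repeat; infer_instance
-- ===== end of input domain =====

-- B groups the non-zero cells per row and tallies each within-row spacing directly into an
-- insertion-ordered count dict (no global all-pairs scan, no intermediate delta list),
-- returning the first-inserted key of maximal count; objective: faster.

-- ===== PORT A =====
-- 'for x, val in enumerate(row): if val != 0: positions.append((x, y, val))'
def pvA_rowpos (x y : Int) : List Int → List (Int × Int × Int)
  | [] => []
  | v :: vs => (if v ≠ 0 then [(x, y, v)] else []) ++ pvA_rowpos (x + 1) y vs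

-- extract_nonzero_positions: 'for y, row in enumerate(grid): …'
def pvA_positions (y : Int) : List (List Int) → List (Int × Int × Int)
  | [] => []
  | row :: rest => pvA_rowpos 0 y row ++ pvA_positions (y + 1) rest

-- 'for i in range(len(symbols)): for j in range(i+1, len(symbols)): …' as the
-- structural recursion on suffixes: head against every later symbol, then recurse.
def pvA_pairs : List (Int × Int × Int) → List Int
  | [] => []
  | (x1, y1, v1) :: rest =>
      rest.filterMap (fun q =>
        if y1 = q.2.1 ∧ v1 ≠ q.2.2 then
          (if |q.1 - x1| > 0 then some |q.1 - x1| else none)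
        else none) ++ pvA_pairs rest

-- 'Counter(horizontal_deltas).most_common(1)[0][0]': first-inserted key of maximal count
-- (PySem.List.max? returns the FIRST extremal element, matching most_common's stability).
def pvA_mostCommon1 (l : List Int) : Option Int :=
  (PySem.List.max? (PySem.Dict.counter l).items (fun p => p.2)).map (·.1)

def infer_horizontal_repeat (grid : List (List Int)) : Option Int :=
  let horizontal_deltas := pvA_pairs (pvA_positions 0 grid)
  if horizontal_deltas.isEmpty then none else pvA_mostCommon1 horizontal_deltas

-- ===== PORT B =====
-- 'cells = [(x, v) for x, v in enumerate(row) if v != 0]'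
def pvB_cells (row : List Int) : List (Int × Int) :=
  (PySem.List.enumerate row).filterMap (fun p => if p.2 ≠ 0 then some p else none)

-- 'for i in range(n): x1, v1 = cells[i]; for j in range(i+1, n): … counts[d] = counts.get(d, 0) + 1'
def pvB_row (counts : PySem.Dict Int Int) (row : List Int) : PySem.Dict Int Int :=
  let cells := pvB_cells row
  (PySem.List.pyRange 0 (cells.length : Int) 1).foldl (fun d i =>
    (PySem.List.pyRange (i + 1) (cells.length : Int) 1).foldl (fun d j =>
      let p := PySem.List.pyGetD cells i (0, 0)
      let q := PySem.List.pyGetD cells j (0, 0)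
      if p.2 ≠ q.2 then d.insert (q.1 - p.1) (d.getD (q.1 - p.1) 0 + 1) else d) d) counts

-- 'max(counts, key=counts.get)' = first key (insertion order) with the maximal count
def infer_horizontal_repeat_alt (grid : List (List Int)) : Option Int :=
  let counts := grid.foldl pvB_row PySem.Dict.empty
  if counts.size = 0 then none
  else PySem.List.max? counts.keys (fun k => counts.getD k 0)

-- ===== PRECONDITION & SPEC =====
def Spec_infer_horizontal_repeat (grid : List (List Int)) (out : Option Int) : Prop := out = infer_horizontal_repeat_alt grid
instance (grid : List (List Int)) (out : Option Int) : Decidable (Spec_infer_horizontal_repeat grid out) := by unfold Spec_infer_horizontal_repeat; infer_instance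

-- ===== CLAIM (what is proved, stated in full; the proofs are below) =====
def Claim_equal_infer_horizontal_repeat : Prop := ∀ (grid : List (List Int)), Dom_infer_horizontal_repeat grid → Spec_infer_horizontal_repeat grid (infer_horizontal_repeat grid)

-- ===== LEMMAS AND PROOFS =====

-- counts[d] = counts.get(d, 0) + 1, the step B's loops perform for one delta
def pvInc (d : PySem.Dict Int Int) (x : Int) : PySem.Dict Int Int := d.insert x (d.getD x 0 + 1)

-- the sequence of deltas one row contributes, in B's (i < j) emission order
def pvRowDeltas : List (Int × Int) → List Int
  | [] => []
  | p :: rest =>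
      rest.filterMap (fun q => if p.2 ≠ q.2 then some (q.1 - p.1) else none) ++ pvRowDeltas rest

-- all deltas, rows in ascending order
def pvDeltas (grid : List (List Int)) : List Int :=
  grid.flatMap (fun row => pvRowDeltas (pvB_cells row))

-- every index produced by enumerate from s is ≥ s
theorem pv_enumerate_fst_le (xs : List Int) : ∀ (s : Int) (p : Int × Int),
    p ∈ PySem.List.enumerate xs s → s ≤ p.1 := by
  induction xs with
  | nil => intro s p hp; simp [PySem.List.enumerate_nil] at hp
  | cons x t ih =>
      intro s p hp
      rw [PySem.List.enumerate_cons] at hp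
      rcases List.mem_cons.mp hp with rfl | hp
      · simp
      · have := ih (s + 1) p hp; omega

theorem pv_enumerate_pairwise (xs : List Int) : ∀ (s : Int),
    (PySem.List.enumerate xs s).Pairwise (fun p q => p.1 < q.1) := by
  induction xs with
  | nil => intro s; simp [PySem.List.enumerate_nil]
  | cons x t ih =>
      intro s
      rw [PySem.List.enumerate_cons]
      exact List.Pairwise.cons
        (fun q hq => by have := pv_enumerate_fst_le t (s + 1) q hq; simpa using by omega)
        (ih (s + 1))

-- B's cells have strictly increasing x
theorem pv_cells_pairwise (row : List Int) : (pvB_cells row).Pairwise (fun p q => p.1 < q.1) := by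
  unfold pvB_cells
  rw [List.pairwise_filterMap]
  refine List.Pairwise.imp ?_ (pv_enumerate_pairwise row 0)
  intro a b hab p hp q hq
  split_ifs at hp hq
  all_goals simp_all

-- A's per-row positions are B's cells with the row index y inserted
theorem pvA_rowpos_eq_map (y : Int) : ∀ (x : Int) (row : List Int),
    pvA_rowpos x y row =
      ((PySem.List.enumerate row x).filterMap (fun p => if p.2 ≠ 0 then some p else none)).map
        (fun p => (p.1, y, p.2)) := by
  intro x row
  induction row generalizing x with
  | nil => simp [pvA_rowpos, PySem.List.enumerate_nil]
  | cons v vs ih =>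
      rw [PySem.List.enumerate_cons]
      simp only [pvA_rowpos, List.filterMap_cons]
      split_ifs with h
      · simp [ih (x + 1)]
      · simp at h; simp [ih (x + 1)]

theorem pv_mem_positions_le (rows : List (List Int)) : ∀ (y : Int),
    ∀ p ∈ pvA_positions y rows, y ≤ p.2.1 := by
  induction rows with
  | nil => intro y p hp; simp [pvA_positions] at hp
  | cons row rest ih =>
      intro y p hp
      simp only [pvA_positions, List.mem_append] at hp
      rcases hp with hp | hp
      · rw [pvA_rowpos_eq_map] at hp
        obtain ⟨q, _, rfl⟩ := List.mem_map.mp hp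
        simp
      · have := ih (y + 1) p hp
        omega

-- cross pairs between blocks of different row indices contribute nothing
theorem pvA_pairs_append (b rest : List (Int × Int × Int))
    (h : ∀ p ∈ b, ∀ q ∈ rest, p.2.1 ≠ q.2.1) :
    pvA_pairs (b ++ rest) = pvA_pairs b ++ pvA_pairs rest := by
  induction b with
  | nil => simp [pvA_pairs]
  | cons p b' ih =>
      obtain ⟨x1, y1, v1⟩ := p
      simp only [List.cons_append, pvA_pairs, List.filterMap_append]
      have hz : rest.filterMap (fun q =>
          if y1 = q.2.1 ∧ v1 ≠ q.2.2 then
            (if |q.1 - x1| > 0 then some |q.1 - x1| else none)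
          else none) = [] := by
        apply List.filterMap_eq_nil_iff.mpr
        intro q hq
        have hy : y1 ≠ q.2.1 := h (x1, y1, v1) (by simp) q hq
        simp [hy]
      rw [hz, ih (fun p hp q hq => h p (List.mem_cons_of_mem _ hp) q hq)]
      simp

-- within one row (x strictly increasing), A's pair scan emits exactly pvRowDeltas
theorem pvA_pairs_map (y : Int) : ∀ (l : List (Int × Int)),
    l.Pairwise (fun p q => p.1 < q.1) →
    pvA_pairs (l.map (fun p => (p.1, y, p.2))) = pvRowDeltas l := by
  intro l
  induction l with
  | nil => intro _; rfl
  | cons p t ih =>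
      intro hpw
      obtain ⟨x1, v1⟩ := p
      obtain ⟨hhd, htl⟩ := List.pairwise_cons.mp hpw
      simp only [List.map_cons, pvA_pairs, pvRowDeltas, List.filterMap_map, ih htl]
      congr 1
      apply List.filterMap_congr
      intro q hq
      have hx : x1 < q.1 := hhd q hq
      by_cases hv : v1 = q.2
      · simp [hv]
      · have : |q.1 - x1| = q.1 - x1 := abs_of_pos (by omega)
        simp [hv, this]
        omega

-- A's whole delta list is pvDeltas
theorem pv_deltas_eq (rows : List (List Int)) : ∀ (y : Int),
    pvA_pairs (pvA_positions y rows) = pvDeltas rows := by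
  induction rows with
  | nil => intro y; rfl
  | cons row rest ih =>
      intro y
      simp only [pvA_positions, pvDeltas, List.flatMap_cons]
      rw [pvA_pairs_append _ _ (by
        intro p hp q hq
        rw [pvA_rowpos_eq_map] at hp
        obtain ⟨p', _, rfl⟩ := List.mem_map.mp hp
        have := pv_mem_positions_le rest (y + 1) q hq
        simp only
        omega)]
      rw [pvA_rowpos_eq_map]
      show pvA_pairs ((pvB_cells row).map _) ++ _ = _
      rw [pvA_pairs_map y (pvB_cells row) (pv_cells_pairwise row), ih (y + 1)]
      rfl

-- folding pvInc over a filterMap = folding the guarded step over the source list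
theorem pv_foldl_filterMap (g : Int × Int → Option Int) :
    ∀ (l : List (Int × Int)) (d : PySem.Dict Int Int),
    (l.filterMap g).foldl pvInc d =
      l.foldl (fun d q => match g q with | some x => pvInc d x | none => d) d := by
  intro l
  induction l with
  | nil => intro d; rfl
  | cons q t ih =>
      intro d
      cases hg : g q <;> simp [hg, ih]

-- B's inner j-loop, at a fixed i, folds the pairs of cells[i] with each later cell
theorem pvB_inner (cells : List (Int × Int)) (p : Int × Int) (i : Int) (hi : 0 ≤ i)
    (d : PySem.Dict Int Int) :
    (PySem.List.pyRange (i + 1) (cells.length : Int) 1).foldl (fun d j =>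
      let q := PySem.List.pyGetD cells j (0, 0)
      if p.2 ≠ q.2 then d.insert (q.1 - p.1) (d.getD (q.1 - p.1) 0 + 1) else d) d =
    (cells.drop (i + 1).toNat).foldl
      (fun d q => if p.2 ≠ q.2 then pvInc d (q.1 - p.1) else d) d := by
  exact PySem.List.foldl_pyRange_pyGetD' cells (0, 0)
    (fun d q => if p.2 ≠ q.2 then pvInc d (q.1 - p.1) else d) d (a := i + 1) (by omega)

-- B's outer i-loop from k = the pvInc-fold of the deltas of the suffix of cells
theorem pvB_outer (cells : List (Int × Int)) : ∀ (n k : Nat), cells.length - k = n →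
    k ≤ cells.length → ∀ (d : PySem.Dict Int Int),
    (PySem.List.pyRange (k : Int) (cells.length : Int) 1).foldl (fun d i =>
      (PySem.List.pyRange (i + 1) (cells.length : Int) 1).foldl (fun d j =>
        let p := PySem.List.pyGetD cells i (0, 0)
        let q := PySem.List.pyGetD cells j (0, 0)
        if p.2 ≠ q.2 then d.insert (q.1 - p.1) (d.getD (q.1 - p.1) 0 + 1) else d) d) d =
    (pvRowDeltas (cells.drop k)).foldl pvInc d := by
  intro n
  induction n with
  | zero =>
      intro k hn hk d
      have hk' : k = cells.length := by omega
      rw [PySem.List.pyRange_one_eq_nil (by exact_mod_cast le_of_eq hk'.symm)]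
      rw [hk', List.drop_length]
      rfl
  | succ n ih =>
      intro k hn hk d
      have hklt : k < cells.length := by omega
      rw [PySem.List.pyRange_one_cons (by exact_mod_cast hklt)]
      rw [List.foldl_cons]
      have hdrop : cells.drop k = cells[k] :: cells.drop (k + 1) :=
        List.drop_eq_getElem_cons hklt
      have hp : PySem.List.pyGetD cells (k : Int) (0, 0) = cells[k] := by
        rw [PySem.List.pyGetD_eq_getElem cells (0, 0) (by omega) (by exact_mod_cast hklt)]
        simp
      -- evaluate the first outer-body application via the inner-loop lemma
      have hinner := pvB_inner cells (PySem.List.pyGetD cells (k : Int) (0, 0)) (k : Int)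
        (by omega) d
      have hcast : ((k : Int) + 1) = ((k + 1 : Nat) : Int) := by push_cast; ring
      have htoNat : ((k : Int) + 1).toNat = k + 1 := by omega
      rw [htoNat] at hinner
      rw [hinner, hcast, ih (k + 1) (by omega) (by omega)]
      rw [hdrop]
      show _ = (pvRowDeltas (cells[k] :: cells.drop (k + 1))).foldl pvInc d
      rw [pvRowDeltas, List.foldl_append,
        pv_foldl_filterMap (fun q => if cells[k].2 ≠ q.2 then some (q.1 - cells[k].1) else none)]
      congr 1
      rw [hp]
      have hfn : (fun (d : PySem.Dict Int Int) (q : Int × Int) =>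
          match (if cells[k].2 ≠ q.2 then some (q.1 - cells[k].1) else none) with
          | some x => pvInc d x
          | none => d) =
          (fun d q => if cells[k].2 ≠ q.2 then pvInc d (q.1 - cells[k].1) else d) := by
        funext d' q
        by_cases h : cells[k].2 = q.2 <;> simp [h]
      rw [hfn]

-- one row of B's loop = folding pvInc over that row's deltas
theorem pvB_row_eq (d : PySem.Dict Int Int) (row : List Int) :
    pvB_row d row = (pvRowDeltas (pvB_cells row)).foldl pvInc d := by
  unfold pvB_row
  have := pvB_outer (pvB_cells row) (pvB_cells row).length 0 (by omega) (by omega) d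
  simpa using this

-- B's whole dict = folding pvInc over all deltas
theorem pvB_fold_eq (grid : List (List Int)) : ∀ (d : PySem.Dict Int Int),
    grid.foldl pvB_row d = (pvDeltas grid).foldl pvInc d := by
  induction grid with
  | nil => intro d; rfl
  | cons row rest ih =>
      intro d
      simp only [List.foldl_cons, pvDeltas, List.flatMap_cons, List.foldl_append]
      rw [pvB_row_eq, ih]
      rfl

-- first extremal element commutes with map
theorem pv_max?_map {α β : Type} (g : α → β) (f : β → Int) (l : List α) :
    PySem.List.max? (l.map g) f = (PySem.List.max? l (fun x => f (g x))).map g := by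
  unfold PySem.List.max?
  rw [List.foldl_map]
  have : ∀ (l : List α) (a : Option α),
      l.foldl (fun acc x => match acc with
        | none => some (g x)
        | some m => if f m < f (g x) then some (g x) else some m) (a.map g) =
      (l.foldl (fun acc x => match acc with
        | none => some x
        | some m => if f (g m) < f (g x) then some x else some m) a).map g := by
    intro l
    induction l with
    | nil => intro a; rfl
    | cons x t ih =>
        intro a
        cases a with
        | none => exact ih (some x)
        | some m =>
            simp only [List.foldl_cons, Option.map_some]
            by_cases h : f (g m) < f (g x) <;> simp [h] <;> [exact ih (some x); exact ih (some m)]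
  exact this l none

-- ===== VERDICT (by name: the statement is the Claim_ definition above) =====
theorem infer_horizontal_repeat_spec : Claim_equal_infer_horizontal_repeat := by
  intro grid _
  unfold Spec_infer_horizontal_repeat infer_horizontal_repeat infer_horizontal_repeat_alt
  rw [pv_deltas_eq grid 0, pvB_fold_eq grid PySem.Dict.empty]
  have hcounter : (pvDeltas grid).foldl pvInc PySem.Dict.empty =
      PySem.Dict.counter (pvDeltas grid) := by
    unfold pvInc
    exact PySem.Dict.foldl_insert_getD_add_one_eq_counter (pvDeltas grid)
  rw [hcounter]
  by_cases hD : pvDeltas grid = []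
  · simp [hD, PySem.Dict.counter]
  · obtain ⟨x, hx⟩ : ∃ x, x ∈ pvDeltas grid := by
      cases h : pvDeltas grid with
      | nil => exact absurd h hD
      | cons a t => exact ⟨a, by simp⟩
    have hxS : x ∈ PySem.Set.ofList (pvDeltas grid) := (PySem.Set.mem_ofList _ _).mpr hx
    have hsize : (PySem.Dict.counter (pvDeltas grid)).size ≠ 0 := by
      unfold PySem.Dict.size
      rw [PySem.Dict.items_counter]
      simpa using List.ne_nil_of_mem hxS
    have hne : (pvDeltas grid).isEmpty = false := by simpa [List.isEmpty_iff] using hD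
    simp only [hne, hsize, Bool.false_eq_true, if_false]
    unfold pvA_mostCommon1
    rw [PySem.Dict.items_counter, PySem.Dict.keys_counter]
    rw [pv_max?_map (fun k => (k, ((pvDeltas grid).count k : Int))) (fun p => p.2)]
    have hfun : (fun k => (PySem.Dict.counter (pvDeltas grid)).getD k 0) =
        (fun k => (((pvDeltas grid).count k : Int))) :=
      funext (fun k => PySem.Dict.getD_counter (pvDeltas grid) k)
    rw [hfun, Option.map_map]
    conv_lhs => rw [show ((fun (x : Int × Int) => x.1) ∘ fun k : Int =>
      (k, ((pvDeltas grid).count k : Int))) = fun k => k from rfl]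
    exact Option.map_id'
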